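-- pv_equiv track=rewrite | github.com/leogcalderon/Programacion_Python_UNSAM | Clases/03_Listas/propaga.py | propagar_adyacentes
-- ===== SOURCE A (Python) =====
-- def buscar_elemento(lista,elemento):
--     '''
--     Busca posiciones del elemento en lista
--     '''
--     idx = []
--     for i, e in enumerate(lista):
--         if lista[i] == elemento:
--             idx.append(i)
--     return idx
--
-- def propagar_adyacentes(lista):
--     '''
--     Creo copia de la lista para ir modificandola
--     '''
--     propagado = lista.copy()
--
--     '''
--     Busco indices de los que estan prendidos
--     '''
--     idx_prendidos = buscar_elemento(lista,1)
--
--     '''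
--     Modifico los fosforos adyacentes
--     '''
--     for idx in idx_prendidos:
--         if idx != 0:
--             if lista[idx-1] == 0:
--                 propagado[idx-1] = 1
--         if idx != (len(lista) - 1):
--             if lista[idx+1] == 0:
--                 propagado[idx+1] = 1
--
--     return propagado
-- ===== SOURCE B (Python) =====
-- def propagar_adyacentes(lista):
--     n = len(lista)
--     return [1 if v == 0 and ((j > 0 and lista[j - 1] == 1) or (j < n - 1 and lista[j + 1] == 1)) else v
--             for j, v in enumerate(lista)]
-- ===== Notes on version B (the rewrite author's own statement) =====
-- stated objective: simpler
-- what changed: A scatters: it first collects the indices of all 1-cells and then writes 1 into each adjacent 0-cell of a copy; B gathers: one comprehension computes each cell's new value directly from its original neighbours, with no index list and no in-place writes.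
import Mathlib
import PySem

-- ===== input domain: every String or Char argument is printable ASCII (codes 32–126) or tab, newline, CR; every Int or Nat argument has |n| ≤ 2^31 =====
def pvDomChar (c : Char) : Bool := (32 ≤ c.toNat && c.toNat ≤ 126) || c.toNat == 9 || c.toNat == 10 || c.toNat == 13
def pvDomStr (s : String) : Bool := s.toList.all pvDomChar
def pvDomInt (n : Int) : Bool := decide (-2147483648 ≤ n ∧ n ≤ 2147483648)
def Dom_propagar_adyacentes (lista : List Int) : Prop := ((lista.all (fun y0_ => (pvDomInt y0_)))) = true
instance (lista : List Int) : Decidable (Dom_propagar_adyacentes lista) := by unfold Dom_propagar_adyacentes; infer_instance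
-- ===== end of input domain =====

-- B gathers each cell's new value from its original neighbours in one pass, instead of A's
-- scatter (collect the indices of 1-cells, then write into a copy); the return values agree.

-- ===== PORT A =====
-- 'for i, e in enumerate(lista): if lista[i] == elemento: idx.append(i)'
-- (lista[i] via pyGetD is exact: i ranges over [0, len))
def buscar_elemento (lista : List Int) (elemento : Int) : List Int :=
  (PySem.List.enumerate lista).foldl
    (fun idx p => if PySem.List.pyGetD lista p.1 0 = elemento then idx ++ [p.1] else idx) []

-- the body of A's 'for idx in idx_prendidos' loop (lista[idx∓1] / propagado[idx∓1] are exact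
-- via pyGetD/pySetD: the guards keep the index inside [0, len))
def pvStep (lista : List Int) (propagado : List Int) (idx : Int) : List Int :=
  let propagado :=
    if idx ≠ 0 then
      (if PySem.List.pyGetD lista (idx - 1) 0 = 0 then PySem.List.pySetD propagado (idx - 1) 1
       else propagado)
    else propagado
  if idx ≠ (lista.length : Int) - 1 then
    (if PySem.List.pyGetD lista (idx + 1) 0 = 0 then PySem.List.pySetD propagado (idx + 1) 1
     else propagado)
  else propagado

def propagar_adyacentes (lista : List Int) : List Int :=
  let propagado := lista
  let idx_prendidos := buscar_elemento lista 1
  idx_prendidos.foldl (pvStep lista) propagado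

-- ===== PORT B =====
def propagar_adyacentes_alt (lista : List Int) : List Int :=
  let n : Int := lista.length
  (PySem.List.enumerate lista).map
    (fun p =>
      if p.2 = 0 ∧ ((p.1 > 0 ∧ PySem.List.pyGetD lista (p.1 - 1) 0 = 1) ∨
                    (p.1 < n - 1 ∧ PySem.List.pyGetD lista (p.1 + 1) 0 = 1))
      then 1 else p.2)

-- ===== PRECONDITION & SPEC =====
def Spec_propagar_adyacentes (lista : List Int) (out : List Int) : Prop := out = propagar_adyacentes_alt lista
instance (lista : List Int) (out : List Int) : Decidable (Spec_propagar_adyacentes lista out) := by unfold Spec_propagar_adyacentes; infer_instance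

-- ===== CLAIM (what is proved, stated in full; the proofs are below) =====
def Claim_equal_propagar_adyacentes : Prop := ∀ (lista : List Int), Dom_propagar_adyacentes lista → Spec_propagar_adyacentes lista (propagar_adyacentes lista)

-- ===== LEMMAS AND PROOFS =====

theorem buscar_aux (lista : List Int) (e : Int) (l : List (Int × Int)) (acc : List Int) :
    l.foldl (fun idx p => if PySem.List.pyGetD lista p.1 0 = e then idx ++ [p.1] else idx) acc
      = acc ++ (l.filter (fun p => PySem.List.pyGetD lista p.1 0 = e)).map (·.1) := by
  induction l generalizing acc with
  | nil => simp
  | cons a l ih =>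
      simp only [List.foldl_cons, List.filter_cons]
      by_cases h : PySem.List.pyGetD lista a.1 0 = e <;> simp [h, ih]

theorem mem_buscar (lista : List Int) (e : Int) (i : Int) :
    i ∈ buscar_elemento lista e ↔
      ∃ k : Nat, k < lista.length ∧ i = (k : Int) ∧ lista.getD k 0 = e := by
  unfold buscar_elemento
  rw [buscar_aux]
  simp only [List.nil_append, List.mem_map, List.mem_filter]
  constructor
  · rintro ⟨p, ⟨hp, hq⟩, rfl⟩
    rw [PySem.List.mem_enumerate_iff] at hp
    obtain ⟨k, hk, rfl⟩ := hp
    refine ⟨k, hk, by simp, ?_⟩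
    simpa [List.getD, hk] using of_decide_eq_true hq
  · rintro ⟨k, hk, rfl, hv⟩
    refine ⟨((k : Int), lista[k]), ⟨?_, ?_⟩, rfl⟩
    · rw [PySem.List.mem_enumerate_iff]; exact ⟨k, hk, by simp⟩
    · simp [List.getD, hk] at hv ⊢
      simpa [hk] using hv

theorem set_get? (xs : List Int) (i j : Nat) (v : Int) :
    (xs.set i v)[j]? = if i = j ∧ i < xs.length then some v else xs[j]? := by
  rw [List.getElem?_set]
  by_cases h : i = j ∧ i < xs.length
  · rw [if_pos h, if_pos h.1, if_pos h.2]
  · rw [if_neg h]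
    by_cases h1 : i = j
    · have h2 : ¬ i < xs.length := fun hc => h ⟨h1, hc⟩
      rw [if_pos h1, if_neg h2, eq_comm]
      subst h1; exact List.getElem?_eq_none (by omega)
    · rw [if_neg h1]

-- what one iteration of A's loop does to position j
theorem step_get (lista prop : List Int) (idx : Int) (j : Nat)
    (h0 : 0 ≤ idx) (hk : idx < lista.length) (hlen : prop.length = lista.length)
    (hj : j < lista.length) :
    (pvStep lista prop idx)[j]? =
      if lista.getD j 0 = 0 ∧ (idx = (j : Int) + 1 ∨ (1 ≤ j ∧ (j : Int) = idx + 1))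
      then some 1 else prop[j]? := by
  unfold pvStep
  by_cases hz : idx = 0
  · subst hz
    simp only [ne_eq, not_true_eq_false, if_false]
    by_cases hl : (0 : Int) ≠ (lista.length : Int) - 1
    · rw [if_pos hl, show ((0:Int)+1) = (((((0:Int)+1).toNat : Nat)) : Int) by omega, PySem.List.pyGetD_natCast]
      rw [PySem.List.pySetD_natCast]
      by_cases hg : lista.getD ((0:Int)+1).toNat 0 = 0
      · rw [if_pos hg, set_get?]
        by_cases hje : ((0:Int)+1).toNat = j
        · rw [if_pos ⟨hje, by omega⟩, if_pos ⟨hje ▸ hg, Or.inr ⟨by omega, by omega⟩⟩]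
        · rw [if_neg (by tauto), if_neg (by rintro ⟨-, h | h⟩ <;> omega)]
      · rw [if_neg hg,
          if_neg (by rintro ⟨hgj, h | h⟩; · omega
                     · exact hg (by rwa [show ((0:Int)+1).toNat = j by omega]))]
    · rw [if_neg hl, if_neg (by rintro ⟨-, h | h⟩ <;> omega)]
  · rw [if_pos hz, show idx - 1 = ((((idx - 1).toNat : Nat)) : Int) by omega, PySem.List.pyGetD_natCast]
    rw [PySem.List.pySetD_natCast]
    by_cases hl : idx ≠ (lista.length : Int) - 1
    · rw [if_pos hl, show idx + 1 = ((((idx + 1).toNat : Nat)) : Int) by omega, PySem.List.pyGetD_natCast]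
      by_cases hg1 : lista.getD (idx-1).toNat 0 = 0 <;>
        [rw [if_pos hg1]; rw [if_neg hg1]] <;>
      by_cases hg2 : lista.getD (idx+1).toNat 0 = 0
      · rw [if_pos hg2, PySem.List.pySetD_natCast,
          set_get?, set_get?]
        by_cases hj2 : (idx+1).toNat = j
        · rw [if_pos ⟨hj2, by simp; omega⟩, if_pos ⟨hj2 ▸ hg2, Or.inr ⟨by omega, by omega⟩⟩]
        · rw [if_neg (by tauto)]
          by_cases hj1 : (idx-1).toNat = j
          · rw [if_pos ⟨hj1, by omega⟩, if_pos ⟨hj1 ▸ hg1, Or.inl (by omega)⟩]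
          · rw [if_neg (by tauto), if_neg (by rintro ⟨-, h | h⟩ <;> omega)]
      · rw [if_neg hg2, set_get?]
        by_cases hj1 : (idx-1).toNat = j
        · rw [if_pos ⟨hj1, by omega⟩, if_pos ⟨hj1 ▸ hg1, Or.inl (by omega)⟩]
        · rw [if_neg (by tauto),
            if_neg (by rintro ⟨hgj, h | h⟩; · omega
                       · exact hg2 (by rwa [show (idx+1).toNat = j by omega]))]
      · rw [if_pos hg2, PySem.List.pySetD_natCast, set_get?]
        by_cases hj2 : (idx+1).toNat = j
        · rw [if_pos ⟨hj2, by omega⟩, if_pos ⟨hj2 ▸ hg2, Or.inr ⟨by omega, by omega⟩⟩]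
        · rw [if_neg (by tauto),
            if_neg (by rintro ⟨hgj, h | h⟩; · exact hg1 (by rwa [show (idx-1).toNat = j by omega])
                       · omega)]
      · rw [if_neg hg2,
          if_neg (by rintro ⟨hgj, h | h⟩; · exact hg1 (by rwa [show (idx-1).toNat = j by omega])
                     · exact hg2 (by rwa [show (idx+1).toNat = j by omega]))]
    · rw [if_neg hl]
      by_cases hg1 : lista.getD (idx-1).toNat 0 = 0
      · rw [if_pos hg1, set_get?]
        by_cases hj1 : (idx-1).toNat = j
        · rw [if_pos ⟨hj1, by omega⟩, if_pos ⟨hj1 ▸ hg1, Or.inl (by omega)⟩]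
        · rw [if_neg (by tauto), if_neg (by rintro ⟨-, h | h⟩ <;> omega)]
      · rw [if_neg hg1,
          if_neg (by rintro ⟨hgj, h | h⟩; · exact hg1 (by rwa [show (idx-1).toNat = j by omega])
                     · omega)]

theorem step_len (lista prop : List Int) (idx : Int) :
    (pvStep lista prop idx).length = prop.length := by
  unfold pvStep
  split_ifs <;> simp [PySem.List.length_pySetD]

theorem fold_len (lista : List Int) (L : List Int) (prop : List Int) :
    (L.foldl (pvStep lista) prop).length = prop.length := by
  induction L generalizing prop with
  | nil => rfl
  | cons a L ih => rw [List.foldl_cons, ih, step_len]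

-- what the whole loop does to position j
theorem fold_get (lista : List Int) (L : List Int) (prop : List Int)
    (hL : ∀ i ∈ L, 0 ≤ i ∧ i < (lista.length : Int))
    (hlen : prop.length = lista.length) (j : Nat) (hj : j < lista.length) :
    (L.foldl (pvStep lista) prop)[j]? =
      if lista.getD j 0 = 0 ∧ (((j : Int) + 1) ∈ L ∨ (1 ≤ j ∧ ((j : Int) - 1) ∈ L))
      then some 1 else prop[j]? := by
  induction L generalizing prop with
  | nil => simp
  | cons a L ih =>
      have ha := hL a List.mem_cons_self
      have hL' : ∀ i ∈ L, 0 ≤ i ∧ i < (lista.length : Int) :=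
        fun i hi => hL i (List.mem_cons_of_mem _ hi)
      rw [List.foldl_cons, ih (pvStep lista prop a) hL' (by rw [step_len, hlen])]
      by_cases hcl : lista.getD j 0 = 0 ∧ (((j : Int) + 1) ∈ L ∨ (1 ≤ j ∧ ((j : Int) - 1) ∈ L))
      · rw [if_pos hcl, if_pos ⟨hcl.1, by
          rcases hcl.2 with h | h
          · exact Or.inl (List.mem_cons_of_mem _ h)
          · exact Or.inr ⟨h.1, List.mem_cons_of_mem _ h.2⟩⟩]
      · rw [if_neg hcl, step_get lista prop a j ha.1 ha.2 hlen hj]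
        by_cases hs : lista.getD j 0 = 0 ∧ (a = (j : Int) + 1 ∨ (1 ≤ j ∧ (j : Int) = a + 1))
        · rw [if_pos hs, if_pos ⟨hs.1, by
            rcases hs.2 with h | h
            · exact Or.inl (by rw [← h]; exact List.mem_cons_self)
            · exact Or.inr ⟨h.1, by rw [show (j : Int) - 1 = a by omega]; exact List.mem_cons_self⟩⟩]
        · rw [if_neg hs, if_neg (by
            rintro ⟨hg, h | h⟩
            · rcases List.mem_cons.1 h with h1 | h1
              · exact hs ⟨hg, Or.inl h1.symm⟩
              · exact hcl ⟨hg, Or.inl h1⟩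
            · rcases List.mem_cons.1 h.2 with h1 | h1
              · exact hs ⟨hg, Or.inr ⟨h.1, by omega⟩⟩
              · exact hcl ⟨hg, Or.inr ⟨h.1, h1⟩⟩)]

-- ===== VERDICT (by name: the statement is the Claim_ definition above) =====
theorem propagar_adyacentes_spec : Claim_equal_propagar_adyacentes := by
  intro lista _
  unfold Spec_propagar_adyacentes propagar_adyacentes propagar_adyacentes_alt
  apply List.ext_getElem?
  intro j
  by_cases hj : j < lista.length
  case neg =>
    rw [List.getElem?_eq_none (by rw [fold_len]; omega),
        List.getElem?_eq_none (by simp [PySem.List.length_enumerate]; omega)]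
  case pos =>
    have hmem : ∀ i ∈ buscar_elemento lista 1, 0 ≤ i ∧ i < (lista.length : Int) := by
      intro i hi
      obtain ⟨k, hk, rfl, -⟩ := (mem_buscar lista 1 i).1 hi
      constructor <;> omega
    rw [fold_get lista (buscar_elemento lista 1) lista hmem rfl j hj]
    rw [List.getElem?_map, PySem.List.getElem?_enumerate, List.getElem?_eq_getElem hj]
    simp only [Option.map_some, zero_add]
    have hgd : lista.getD j 0 = lista[j] := List.getD_eq_getElem lista 0 hj
    by_cases hc : lista.getD j 0 = 0 ∧ (((j : Int) + 1) ∈ buscar_elemento lista 1 ∨ (1 ≤ j ∧ ((j : Int) - 1) ∈ buscar_elemento lista 1))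
    · have hcB : lista[j] = 0 ∧ (((j : Int) > 0 ∧ PySem.List.pyGetD lista ((j : Int) - 1) 0 = 1) ∨
          ((j : Int) < (lista.length : Int) - 1 ∧ PySem.List.pyGetD lista ((j : Int) + 1) 0 = 1)) := by
        refine ⟨hgd ▸ hc.1, ?_⟩
        rcases hc.2 with h | h
        · obtain ⟨k, hk, he, hv⟩ := (mem_buscar lista 1 _).1 h
          refine Or.inr ⟨by omega, ?_⟩
          rw [show (j : Int) + 1 = ((k : Nat) : Int) from he, PySem.List.pyGetD_natCast]; exact hv
        · obtain ⟨k, hk, he, hv⟩ := (mem_buscar lista 1 _).1 h.2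
          refine Or.inl ⟨by omega, ?_⟩
          rw [show (j : Int) - 1 = ((k : Nat) : Int) from he, PySem.List.pyGetD_natCast]; exact hv
      rw [if_pos hc, if_pos hcB]
    · have hnB : ¬ (lista[j] = 0 ∧ (((j : Int) > 0 ∧ PySem.List.pyGetD lista ((j : Int) - 1) 0 = 1) ∨
          ((j : Int) < (lista.length : Int) - 1 ∧ PySem.List.pyGetD lista ((j : Int) + 1) 0 = 1))) := by
        rintro ⟨hv, ⟨hl1, hl2⟩ | ⟨hl1, hl2⟩⟩
        · refine hc ⟨hgd ▸ hv, Or.inr ⟨by omega, ?_⟩⟩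
          rw [mem_buscar]
          refine ⟨j - 1, by omega, by omega, ?_⟩
          rwa [show (j : Int) - 1 = ((j - 1 : Nat) : Int) by omega, PySem.List.pyGetD_natCast] at hl2
        · refine hc ⟨hgd ▸ hv, Or.inl ?_⟩
          rw [mem_buscar]
          refine ⟨j + 1, by omega, by omega, ?_⟩
          rwa [show (j : Int) + 1 = ((j + 1 : Nat) : Int) by omega, PySem.List.pyGetD_natCast] at hl2
      rw [if_neg hc, if_neg hnB]
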